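-- pv_equiv track=rewrite | github.com/Brenopcosta/Problema-N_Damas_Algoritmo_Genetico | AlgoritmoGenetico.py | buscarNumeroDeAtaquesNaDireita
-- ===== SOURCE A (Python) =====
-- def buscarNumeroDeAtaquesNaDireita(tabuleiro):
--     numeroDeAtaques = 0
--
--     for posicaoRainha in range (0,len(tabuleiro)):
--         for possivelAtaqueNaDireita in range (posicaoRainha,len(tabuleiro)):
--             if possivelAtaqueNaDireita == posicaoRainha:
--                 continue
--
--             elif tabuleiro[posicaoRainha] == tabuleiro[possivelAtaqueNaDireita]:
--                 numeroDeAtaques += 1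
--                 break
--     return numeroDeAtaques
-- ===== SOURCE B (Python) =====
-- def buscarNumeroDeAtaquesNaDireita(tabuleiro):
--     frequencia = {}
--     for linha in tabuleiro:
--         frequencia[linha] = frequencia.get(linha, 0) + 1
--     numeroDeAtaques = 0
--     for repeticoes in frequencia.values():
--         numeroDeAtaques += repeticoes - 1
--     return numeroDeAtaques
-- ===== Notes on version B (the rewrite author's own statement) =====
-- stated objective: faster
-- what changed: Replaced the nested rightward rescanning loops with a single frequency-table pass plus a pass over the aggregated counts summing (count - 1).
import Mathlib
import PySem

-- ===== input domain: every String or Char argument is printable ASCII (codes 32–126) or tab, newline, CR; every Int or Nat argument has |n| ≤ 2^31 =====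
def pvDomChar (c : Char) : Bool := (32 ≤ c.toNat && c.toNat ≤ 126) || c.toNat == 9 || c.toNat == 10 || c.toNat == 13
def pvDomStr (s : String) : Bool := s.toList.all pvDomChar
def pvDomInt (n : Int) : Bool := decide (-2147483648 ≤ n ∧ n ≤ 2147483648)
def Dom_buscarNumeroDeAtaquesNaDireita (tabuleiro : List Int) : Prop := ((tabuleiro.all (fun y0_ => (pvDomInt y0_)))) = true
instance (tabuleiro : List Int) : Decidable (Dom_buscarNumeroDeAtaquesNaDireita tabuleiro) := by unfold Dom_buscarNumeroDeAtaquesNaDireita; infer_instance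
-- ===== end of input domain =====

-- B builds a frequency table in one pass and sums (count - 1) over the distinct values,
-- replacing A's rightward rescanning from every position (faster).

-- ===== PORT A =====
-- the inner 'for possivelAtaqueNaDireita in range(posicaoRainha, len(tabuleiro))' loop with its
-- continue/break, as structural recursion over the remaining index list
def pvInnerA (tab : List Int) (i : Int) : List Int → Int
  | [] => 0
  | j :: rest =>
      if j = i then pvInnerA tab i rest
      else if PySem.List.pyGetD tab i 0 = PySem.List.pyGetD tab j 0 then 1
      else pvInnerA tab i rest

def buscarNumeroDeAtaquesNaDireita (tabuleiro : List Int) : Int :=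
  (PySem.List.pyRange 0 (tabuleiro.length : Int) 1).foldl
    (fun acc i => acc + pvInnerA tabuleiro i (PySem.List.pyRange i (tabuleiro.length : Int) 1)) 0

-- ===== PORT B =====
def buscarNumeroDeAtaquesNaDireita_alt (tabuleiro : List Int) : Int :=
  let frequencia : PySem.Dict Int Int :=
    tabuleiro.foldl (fun d v => d.insert v (d.getD v 0 + 1)) PySem.Dict.empty
  (PySem.Dict.values frequencia).foldl (fun acc c => acc + (c - 1)) 0

-- ===== PRECONDITION & SPEC =====
def Spec_buscarNumeroDeAtaquesNaDireita (tabuleiro : List Int) (out : Int) : Prop := out = buscarNumeroDeAtaquesNaDireita_alt tabuleiro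
instance (tabuleiro : List Int) (out : Int) : Decidable (Spec_buscarNumeroDeAtaquesNaDireita tabuleiro out) := by unfold Spec_buscarNumeroDeAtaquesNaDireita; infer_instance

-- ===== CLAIM (what is proved, stated in full; the proofs are below) =====
def Claim_equal_buscarNumeroDeAtaquesNaDireita : Prop := ∀ (tabuleiro : List Int), Dom_buscarNumeroDeAtaquesNaDireita tabuleiro → Spec_buscarNumeroDeAtaquesNaDireita tabuleiro (buscarNumeroDeAtaquesNaDireita tabuleiro)

-- ===== LEMMAS AND PROOFS =====

-- recursive reference value both sides are reduced to:
-- the number of elements with an equal element strictly to their right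
def pvF : List Int → Int
  | [] => 0
  | x :: t => (if x ∈ t then 1 else 0) + pvF t

-- ---- A-side: A's index loops compute pvF ----

theorem pvInner_ge (t : List Int) (i : Int) :
    ∀ (a : Nat), i < (a : Int) →
    pvInnerA t i (PySem.List.pyRange (a : Int) (t.length : Int)) =
      (if PySem.List.pyGetD t i 0 ∈ t.drop a then 1 else 0) := by
  intro a
  induction ha : t.length - a generalizing a with
  | zero =>
    intro _
    have hnil : PySem.List.pyRange (a : Int) (t.length : Int) = [] := by
      simp [PySem.List.pyRange]; omega
    have hd : t.drop a = [] := List.drop_eq_nil_of_le (by omega)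
    simp [hnil, hd, pvInnerA]
  | succ k ih =>
    intro hia
    have hlt : a < t.length := by omega
    rw [PySem.List.pyRange_one_cons (by exact_mod_cast hlt)]
    have hdrop : t.drop a = t[a] :: t.drop (a + 1) := List.drop_eq_getElem_cons hlt
    have hga : PySem.List.pyGetD t (a : Int) 0 = t[a] := by
      rw [PySem.List.pyGetD_eq_getElem t 0 (by positivity) (by exact_mod_cast hlt)]
      simp
    unfold pvInnerA
    rw [if_neg (by omega)]
    by_cases heq : PySem.List.pyGetD t i 0 = PySem.List.pyGetD t (a : Int) 0
    · rw [if_pos heq]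
      have hin : PySem.List.pyGetD t i 0 = t[a] := heq.trans hga
      rw [hdrop, if_pos (by rw [hin]; exact List.mem_cons_self)]
    · rw [if_neg heq]
      have : ((a : Int) + 1) = ((a + 1 : Nat) : Int) := by push_cast; ring
      rw [this, ih (a + 1) (by omega) (by push_cast; omega)]
      have hne : PySem.List.pyGetD t i 0 ≠ t[a] := fun h => heq (h.trans hga.symm)
      have hiff : (PySem.List.pyGetD t i 0 ∈ List.drop a t)
          ↔ (PySem.List.pyGetD t i 0 ∈ List.drop (a + 1) t) := by
        rw [hdrop, List.mem_cons]
        simp [hne]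
      simp only [hiff]

theorem pvInner_at (t : List Int) (i : Nat) (hi : i < t.length) :
    pvInnerA t (i : Int) (PySem.List.pyRange (i : Int) (t.length : Int)) =
      (if PySem.List.pyGetD t (i : Int) 0 ∈ t.drop (i + 1) then 1 else 0) := by
  rw [PySem.List.pyRange_one_cons (by exact_mod_cast hi)]
  unfold pvInnerA
  rw [if_pos rfl]
  have : ((i : Int) + 1) = ((i + 1 : Nat) : Int) := by push_cast; ring
  rw [this, pvInner_ge t (i : Int) (i + 1) (by push_cast; omega)]

theorem pyRange_succ_shift (n : Nat) :
    PySem.List.pyRange 1 ((n : Int) + 1) = (PySem.List.pyRange 0 (n : Int)).map (· + 1) := by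
  induction n with
  | zero => simp [PySem.List.pyRange]
  | succ k ih =>
    have h1 : PySem.List.pyRange 1 (((k + 1 : Nat) : Int) + 1)
        = PySem.List.pyRange 1 ((k : Int) + 1) ++ [(k : Int) + 1] := by
      push_cast
      exact PySem.List.pyRange_one_succ_right (by omega)
    have h2 : PySem.List.pyRange 0 ((k + 1 : Nat) : Int)
        = PySem.List.pyRange 0 (k : Int) ++ [(k : Int)] := by
      push_cast
      exact PySem.List.pyRange_one_succ_right (by omega)
    rw [h1, h2, ih, List.map_append]; simp

-- the per-index summand of A's outer loop, as a list sum
def pvU (t : List Int) : Int :=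
  ((PySem.List.pyRange 0 (t.length : Int)).map
    (fun i => if PySem.List.pyGetD t i 0 ∈ t.drop (i.toNat + 1) then (1 : Int) else 0)).sum

theorem pvA_eq_pvU (tab : List Int) : buscarNumeroDeAtaquesNaDireita tab = pvU tab := by
  unfold buscarNumeroDeAtaquesNaDireita pvU
  rw [PySem.List.foldl_add]
  rw [zero_add]
  congr 1
  apply List.map_congr_left
  intro i hi
  rw [PySem.List.mem_pyRange_one] at hi
  have h1 : i = ((i.toNat : Nat) : Int) := by omega
  have h2 : i.toNat < tab.length := by omega
  rw [h1, pvInner_at tab i.toNat h2]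
  simp only [Int.toNat_natCast]
  rfl

theorem pvU_eq_pvF (tab : List Int) : pvU tab = pvF tab := by
  induction tab with
  | nil => simp [pvU, pvF, PySem.List.pyRange]
  | cons x t ih =>
    unfold pvU
    have hlen : ((x :: t).length : Int) = (t.length : Int) + 1 := by push_cast [List.length_cons]; ring
    rw [hlen, PySem.List.pyRange_one_cons (by omega), List.map_cons, List.sum_cons]
    have hhead : (if PySem.List.pyGetD (x :: t) 0 0 ∈ (x :: t).drop ((0 : Int).toNat + 1) then (1 : Int) else 0)
        = (if x ∈ t then (1 : Int) else 0) := by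
      simp [PySem.List.pyGetD]
    rw [hhead]
    have htail : ((PySem.List.pyRange (0 + 1) ((t.length : Int) + 1)).map
        (fun i => if PySem.List.pyGetD (x :: t) i 0 ∈ (x :: t).drop (i.toNat + 1) then (1 : Int) else 0)).sum
        = pvU t := by
      rw [zero_add, pyRange_succ_shift t.length, List.map_map]
      unfold pvU
      congr 1
      apply List.map_congr_left
      intro j hj
      rw [PySem.List.mem_pyRange_one] at hj
      have hj0 : 0 ≤ j := hj.1
      have e1 : PySem.List.pyGetD (x :: t) (j + 1) 0 = PySem.List.pyGetD t j 0 := by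
        rw [PySem.List.pyGetD_of_nonneg _ _ (by omega), PySem.List.pyGetD_of_nonneg _ _ hj0]
        have : (j + 1).toNat = j.toNat + 1 := by omega
        rw [this]
        rfl
      have e2 : (j + 1).toNat + 1 = (j.toNat + 1) + 1 := by omega
      simp only [Function.comp, e1, e2, List.drop_succ_cons]
    rw [htail, pvF, ih]

-- ---- B-side: the frequency table computes length - number of distinct values, and so does pvF ----

theorem pvOfList_perm_dedup (t : List Int) : (PySem.Set.ofList t).Perm t.dedup := by
  rw [List.perm_ext_iff_of_nodup (PySem.Set.nodup_ofList t) t.nodup_dedup]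
  intro a; rw [PySem.Set.mem_ofList, List.mem_dedup]

theorem pvF_eq (t : List Int) : pvF t = (t.length : Int) - (t.dedup.length : Int) := by
  induction t with
  | nil => simp [pvF]
  | cons x t ih =>
    by_cases hx : x ∈ t
    · rw [List.dedup_cons_of_mem hx]
      simp only [pvF, if_pos hx, ih, List.length_cons]
      push_cast; ring
    · rw [List.dedup_cons_of_notMem hx]
      simp only [pvF, if_neg hx, ih, List.length_cons]
      push_cast; ring

theorem pvB_eq (tab : List Int) :
    buscarNumeroDeAtaquesNaDireita_alt tab = (tab.length : Int) - (tab.dedup.length : Int) := by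
  unfold buscarNumeroDeAtaquesNaDireita_alt
  rw [PySem.Dict.foldl_insert_getD_add_one_eq_counter]
  have hv : (PySem.Dict.counter tab).values
      = (PySem.Set.ofList tab).map (fun k => (List.count k tab : Int)) := by
    show (PySem.Dict.counter tab).items.map (·.2) = _
    rw [PySem.Dict.items_counter]
    simp
  show List.foldl (fun acc c => acc + (c - 1)) 0 (PySem.Dict.counter tab).values
      = (tab.length : Int) - (tab.dedup.length : Int)
  rw [hv, PySem.List.foldl_add]
  have hperm := (pvOfList_perm_dedup tab).map (fun k => (List.count k tab : Int) - 1)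
  have hsum : ((PySem.Set.ofList tab).map ((fun c => c - 1) ∘ fun k => (List.count k tab : Int))).sum
      = ((tab.dedup).map (fun k => (List.count k tab : Int) - 1)).sum := hperm.sum_eq
  simp only [List.map_map]
  rw [hsum]
  have h2 : ∀ (s : List Int), (s.map (fun k => (List.count k tab : Int) - 1)).sum
      = (s.map (fun k => (List.count k tab : Int))).sum - (s.length : Int) := by
    intro s; induction s with
    | nil => simp
    | cons a s ih => simp [ih]; ring
  rw [h2]
  have h3 : ((tab.dedup.map (fun k => (List.count k tab : Int))).sum)
      = ((tab.dedup.map (fun k => List.count k tab)).sum : Int) := by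
    rw [Nat.cast_list_sum, List.map_map]; rfl
  rw [h3, List.sum_map_count_dedup_eq_length]
  ring

-- ===== VERDICT (by name: the statement is the Claim_ definition above) =====
theorem buscarNumeroDeAtaquesNaDireita_spec : Claim_equal_buscarNumeroDeAtaquesNaDireita := by
  intro tab _
  unfold Spec_buscarNumeroDeAtaquesNaDireita
  rw [pvA_eq_pvU, pvU_eq_pvF, pvF_eq, pvB_eq]
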